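-- pv_equiv track=rewrite | github.com/hak023/sip_pbx | src/ai_voicebot/langgraph/nodes/adaptive_rag.py | _contextual_compress
-- ===== SOURCE A (Python) =====
-- from typing import List, Dict
--
-- COMPRESSION_MAX_CHARS = 800  # 압축 후 최대 문자 수
--
-- def _contextual_compress(docs: List[Dict], query: str) -> List[Dict]:
--     """
--     Contextual Compression: 질문과 관련된 핵심 문장만 추출.
--     간단한 키워드 매칭 기반 (LLM 호출 없이 빠르게).
--     """
--     query_words = set(query.lower().split())
--     compressed = []
--     total_chars = 0
--
--     for doc in docs:
--         text = doc.get("text", "")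
--         if not text:
--             continue
--
--         # 문장 분리
--         sentences = text.replace("\n", ". ").split(". ")
--         relevant_sentences = []
--
--         for sent in sentences:
--             sent = sent.strip()
--             if not sent:
--                 continue
--             # 키워드 겹침 점수
--             sent_words = set(sent.lower().split())
--             overlap = len(query_words & sent_words)
--             if overlap > 0 or len(sentences) <= 3:
--                 relevant_sentences.append(sent)
--
--         compressed_text = ". ".join(relevant_sentences)
--
--         if total_chars + len(compressed_text) > COMPRESSION_MAX_CHARS:
--             remaining = COMPRESSION_MAX_CHARS - total_chars
--             if remaining > 50:
--                 compressed_text = compressed_text[:remaining] + "..."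
--             else:
--                 break
--
--         total_chars += len(compressed_text)
--         compressed.append({
--             **doc,
--             "text": compressed_text,
--         })
--
--     return compressed
-- ===== SOURCE B (Python) =====
-- COMPRESSION_MAX_CHARS = 800
--
--
-- def _contextual_compress(docs, query):
--     query_words = set(query.lower().split())
--
--     # Stage 1: per-doc compressed text for every doc with non-empty text.
--     pairs = []
--     for doc in docs:
--         text = doc.get("text", "")
--         if text:
--             sentences = text.replace("\n", ". ").split(". ")
--             keep_all = len(sentences) <= 3
--             kept = [s for s in (r.strip() for r in sentences)
--                     if s and (keep_all or not query_words.isdisjoint(s.lower().split()))]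
--             pairs.append((doc, ". ".join(kept)))
--
--     # Stage 2: running character totals (prefix sums, nondecreasing).
--     sums = []
--     t = 0
--     for _, ct in pairs:
--         t += len(ct)
--         sums.append(t)
--
--     # Stage 3: cutoff index = how many prefix totals fit in the budget
--     # (valid because the totals are nondecreasing — no budget loop needed).
--     k = len([p for p in sums if p <= COMPRESSION_MAX_CHARS])
--
--     # Stage 4: emit the fitting docs, plus one truncated doc if worthwhile.
--     out = [{**doc, "text": ct} for doc, ct in pairs[:k]]
--     if k < len(pairs):
--         remaining = COMPRESSION_MAX_CHARS - (sums[k - 1] if k else 0)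
--         if remaining > 50:
--             doc, ct = pairs[k]
--             out.append({**doc, "text": ct[:remaining] + "..."})
--     return out
-- ===== Notes on version B (the rewrite author's own statement) =====
-- stated objective: alternative
-- what changed: A's single fused loop with a running total and break/truncate inline is replaced by a staged pipeline: per-doc compression into (doc, text) pairs, a prefix-sum list of lengths, a closed-form cutoff index (count of prefix sums within the 800-char budget, valid since prefix sums are nondecreasing), then a slice plus at most one truncated doc — no budget loop at all.
import Mathlib
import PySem

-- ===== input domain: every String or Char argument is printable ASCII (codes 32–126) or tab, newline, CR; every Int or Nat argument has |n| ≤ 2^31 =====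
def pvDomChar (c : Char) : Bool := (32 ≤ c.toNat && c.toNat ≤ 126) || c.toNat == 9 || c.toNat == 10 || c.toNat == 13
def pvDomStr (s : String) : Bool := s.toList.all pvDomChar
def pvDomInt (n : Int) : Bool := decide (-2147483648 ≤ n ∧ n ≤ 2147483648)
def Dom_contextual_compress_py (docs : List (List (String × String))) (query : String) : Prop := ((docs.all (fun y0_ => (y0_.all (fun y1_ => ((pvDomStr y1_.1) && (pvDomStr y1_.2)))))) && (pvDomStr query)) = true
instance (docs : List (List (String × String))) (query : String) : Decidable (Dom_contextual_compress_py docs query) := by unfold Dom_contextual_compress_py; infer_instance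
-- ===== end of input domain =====

-- B replaces A's fused budget loop (running total, inline truncate/break) by a staged
-- pipeline: per-doc compression pairs, a prefix-sum list, a closed-form cutoff index,
-- then slice + at most one truncated doc; objective: alternative decomposition, not faster.

-- {**doc, "text": ct}  (shared dict primitive of both Pythons)
def pvMerge (doc : List (String × String)) (ct : String) : List (String × String) :=
  ((PySem.Dict.mk doc).insert "text" ct).items

-- ===== PORT A =====
-- A's per-doc sentence loop
def pvACompress (qw : PySem.Set String) (text : String) : String :=
  let sentences := (PySem.Str.split? (PySem.Str.replace text "\n" ". ") ". ").getD []
  let relevant := sentences.foldl (fun acc sent0 =>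
      let sent := PySem.Str.strip sent0
      if sent == "" then acc
      else
        let sentWords := PySem.Set.ofList (PySem.Str.split₀ (PySem.Str.lower sent))
        let overlap := PySem.Set.len (PySem.Set.inter qw sentWords)
        if 0 < overlap ∨ sentences.length ≤ 3 then acc ++ [sent] else acc) []
  PySem.Str.join ". " relevant

-- A's main loop over docs, carrying (compressed, total_chars)
def pvALoop (qw : PySem.Set String) :
    List (List (String × String)) → List (List (String × String)) → Int → List (List (String × String))
  | [], acc, _ => acc
  | doc :: rest, acc, total =>
    let text := (PySem.Dict.mk doc).getD "text" ""
    if text == "" then pvALoop qw rest acc total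
    else
      let ct := pvACompress qw text
      if total + PySem.Str.len ct > 800 then
        let remaining := 800 - total
        if remaining > 50 then
          let ct2 := PySem.Str.slice ct none (some remaining) ++ "..."
          pvALoop qw rest (acc ++ [pvMerge doc ct2]) (total + PySem.Str.len ct2)
        else acc
      else pvALoop qw rest (acc ++ [pvMerge doc ct]) (total + PySem.Str.len ct)

def contextual_compress_py (docs : List (List (String × String))) (query : String) : List (List (String × String)) :=
  let qw := PySem.Set.ofList (PySem.Str.split₀ (PySem.Str.lower query))
  pvALoop qw docs [] 0

-- ===== PORT B =====
-- Stage 1 helper: the per-doc sentence comprehension of Source B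
def pvBCompress (qw : PySem.Set String) (text : String) : String :=
  let sentences := (PySem.Str.split? (PySem.Str.replace text "\n" ". ") ". ").getD []
  let keepAll : Bool := decide (sentences.length ≤ 3)
  let kept := (sentences.map PySem.Str.strip).filter
      (fun s => !(s == "") && (keepAll || !(PySem.Set.isdisjoint qw (PySem.Str.split₀ (PySem.Str.lower s)))))
  PySem.Str.join ". " kept

-- Stage 1: the pairs-building loop of Source B
def pvBPairs (qw : PySem.Set String) (docs : List (List (String × String))) :
    List ((List (String × String)) × String) :=
  docs.foldl (fun acc doc =>
    let text := (PySem.Dict.mk doc).getD "text" ""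
    if !(text == "") then acc ++ [(doc, pvBCompress qw text)] else acc) []

-- Stage 2: the prefix-sum loop of Source B (accumulator t, list of running totals)
def pvBSums : List ((List (String × String)) × String) → Int → List Int
  | [], _ => []
  | (_, ct) :: rest, t => (t + PySem.Str.len ct) :: pvBSums rest (t + PySem.Str.len ct)

def contextual_compress_py_alt (docs : List (List (String × String))) (query : String) : List (List (String × String)) :=
  let qw := PySem.Set.ofList (PySem.Str.split₀ (PySem.Str.lower query))
  let pairs := pvBPairs qw docs
  let sums := pvBSums pairs 0
  -- Stage 3: cutoff index k = len([p for p in sums if p <= 800])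
  let k : Int := PySem.List.len (sums.filter (fun p => decide (p ≤ 800)))
  -- Stage 4: out = [merge for pairs[:k]] (+ one truncated doc when worthwhile)
  let out := (PySem.List.slice pairs none (some k)).map (fun p => pvMerge p.1 p.2)
  if k < PySem.List.len pairs then
    let remaining := 800 - (if k == 0 then 0 else PySem.List.pyGetD sums (k - 1) 0)
    if remaining > 50 then
      let p := PySem.List.pyGetD pairs k ([], "")
      out ++ [pvMerge p.1 (PySem.Str.slice p.2 none (some remaining) ++ "...")]
    else out
  else out

-- ===== PRECONDITION & SPEC =====
def Spec_contextual_compress_py (docs : List (List (String × String))) (query : String) (out : List (List (String × String))) : Prop := out = contextual_compress_py_alt docs query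
instance (docs : List (List (String × String))) (query : String) (out : List (List (String × String))) : Decidable (Spec_contextual_compress_py docs query out) := by unfold Spec_contextual_compress_py; infer_instance

-- ===== CLAIM (what is proved, stated in full; the proofs are below) =====
def Claim_equal_contextual_compress_py : Prop := ∀ (docs : List (List (String × String))) (query : String), Dom_contextual_compress_py docs query → Spec_contextual_compress_py docs query (contextual_compress_py docs query)

-- ===== LEMMAS AND PROOFS =====

-- proof-side: B's stages 2-4 with a general budget b (alt = pvStaged (pvBPairs qw docs) 800)
def pvStaged (pairs : List ((List (String × String)) × String)) (b : Int) : List (List (String × String)) :=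
  let sums := pvBSums pairs 0
  let k : Int := PySem.List.len (sums.filter (fun p => decide (p ≤ b)))
  let out := (PySem.List.slice pairs none (some k)).map (fun p => pvMerge p.1 p.2)
  if k < PySem.List.len pairs then
    let remaining := b - (if k == 0 then 0 else PySem.List.pyGetD sums (k - 1) 0)
    if remaining > 50 then
      let p := PySem.List.pyGetD pairs k ([], "")
      out ++ [pvMerge p.1 (PySem.Str.slice p.2 none (some remaining) ++ "...")]
    else out
  else out

-- proof-side: the greedy budget walk both programs implement
def pvW : List ((List (String × String)) × String) → Int → List (List (String × String))
  | [], _ => []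
  | (doc, ct) :: rest, b =>
    if PySem.Str.len ct > b then
      (if b > 50 then [pvMerge doc (PySem.Str.slice ct none (some b) ++ "...")] else [])
    else pvMerge doc ct :: pvW rest (b - PySem.Str.len ct)

theorem pv_len_nonneg (s : String) : 0 ≤ PySem.Str.len s := by
  simp [PySem.Str.len_eq]

-- A's keyword test agrees with B's isdisjoint test
theorem pv_overlap (qw : PySem.Set String) (ws : List String) :
    (0 < PySem.Set.len (PySem.Set.inter qw (PySem.Set.ofList ws))) ↔
      (PySem.Set.isdisjoint qw ws = false) := by
  have h1 : PySem.Set.isdisjoint qw ws = false ↔ ∃ x ∈ qw, x ∈ ws := by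
    rw [Bool.eq_false_iff, Ne, PySem.Set.isdisjoint_iff]
    push Not
    simp
  rw [h1]
  simp only [PySem.Set.len, Int.natCast_pos, List.length_pos_iff, List.ne_nil_iff_exists_cons]
  constructor
  · rintro ⟨x, l, h⟩
    have hm : x ∈ PySem.Set.inter qw (PySem.Set.ofList ws) := by rw [h]; exact List.mem_cons_self
    rw [PySem.Set.mem_inter, PySem.Set.mem_ofList] at hm
    exact ⟨x, hm.1, hm.2⟩
  · rintro ⟨x, hx, hw⟩
    have hm : x ∈ PySem.Set.inter qw (PySem.Set.ofList ws) := by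
      rw [PySem.Set.mem_inter, PySem.Set.mem_ofList]; exact ⟨hx, hw⟩
    rcases List.exists_cons_of_ne_nil (List.ne_nil_of_mem hm) with ⟨y, l, h⟩
    exact ⟨y, l, h⟩

-- A's sentence fold rewritten as B's filter over stripped sentences
theorem pv_fold_filter (qw : PySem.Set String) (cond : Prop) [Decidable cond]
    (l acc : List String) :
    l.foldl (fun acc sent0 =>
      let sent := PySem.Str.strip sent0
      if sent == "" then acc
      else
        let sentWords := PySem.Set.ofList (PySem.Str.split₀ (PySem.Str.lower sent))
        let overlap := PySem.Set.len (PySem.Set.inter qw sentWords)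
        if 0 < overlap ∨ cond then acc ++ [sent] else acc) acc
    = acc ++ (l.map PySem.Str.strip).filter
        (fun s => !(s == "") && (decide cond || !(PySem.Set.isdisjoint qw (PySem.Str.split₀ (PySem.Str.lower s))))) := by
  have hfun : (fun (acc : List String) sent0 =>
      let sent := PySem.Str.strip sent0
      if sent == "" then acc
      else
        let sentWords := PySem.Set.ofList (PySem.Str.split₀ (PySem.Str.lower sent))
        let overlap := PySem.Set.len (PySem.Set.inter qw sentWords)
        if 0 < overlap ∨ cond then acc ++ [sent] else acc)
      = (fun acc sent0 =>
        if (!(PySem.Str.strip sent0 == "") &&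
            (decide cond || !(PySem.Set.isdisjoint qw (PySem.Str.split₀ (PySem.Str.lower (PySem.Str.strip sent0)))))) = true
        then acc ++ [PySem.Str.strip sent0] else acc) := by
    funext acc s0
    by_cases h0 : PySem.Str.strip s0 = ""
    · simp [h0]
    · show (if _ then acc else if _ then _ else acc) = _
      by_cases hc : (0 < PySem.Set.len (PySem.Set.inter qw
          (PySem.Set.ofList (PySem.Str.split₀ (PySem.Str.lower (PySem.Str.strip s0))))) ∨ cond)
      · rw [if_neg (by simpa using h0), if_pos hc, if_pos]
        rcases hc with h | h
        · simp [h0, (pv_overlap _ _).1 h]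
        · simp [h0, h]
      · rw [if_neg (by simpa using h0), if_neg hc, if_neg]
        push Not at hc
        have hb : PySem.Set.isdisjoint qw (PySem.Str.split₀ (PySem.Str.lower (PySem.Str.strip s0))) = true := by
          rcases Bool.eq_false_or_eq_true (PySem.Set.isdisjoint qw (PySem.Str.split₀ (PySem.Str.lower (PySem.Str.strip s0)))) with h | h
          · exact h
          · have := (pv_overlap qw (PySem.Str.split₀ (PySem.Str.lower (PySem.Str.strip s0)))).2 h
            omega
        simp [hb, hc.2]
  rw [hfun, PySem.List.foldl_append_if, List.filter_map]
  congr 1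

-- the two per-doc compressions agree
theorem pv_compress_eq (qw : PySem.Set String) (text : String) :
    pvACompress qw text = pvBCompress qw text := by
  simp only [pvACompress, pvBCompress]
  rw [pv_fold_filter]
  rw [List.nil_append]

-- B's pairs loop as filter-and-map (cons-friendly form)
def pvPF (qw : PySem.Set String) (docs : List (List (String × String))) :
    List ((List (String × String)) × String) :=
  (docs.filter (fun d => !((PySem.Dict.mk d).getD "text" "" == ""))).map
    (fun d => (d, pvBCompress qw ((PySem.Dict.mk d).getD "text" "")))

theorem pv_pairs_eq (qw : PySem.Set String) (docs : List (List (String × String))) :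
    pvBPairs qw docs = pvPF qw docs := by
  simp only [pvBPairs, pvPF]
  rw [PySem.List.foldl_append_if]
  rw [List.nil_append]

-- after A truncates, total_chars is 803 and nothing more is ever appended
theorem pv_aloop_803 (qw : PySem.Set String) (rest acc : List (List (String × String))) :
    pvALoop qw rest acc 803 = acc := by
  induction rest generalizing acc with
  | nil => rfl
  | cons doc rest ih =>
    simp only [pvALoop]
    split_ifs with h1 h2 h3
    · exact ih acc
    · exact absurd h3 (by omega)
    · rfl
    · have := pv_len_nonneg (pvACompress qw ((PySem.Dict.mk doc).getD "text" ""))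
      omega

-- length of a clamped head slice of a string
theorem pv_len_slice (s : String) (r : Int) (h0 : 0 ≤ r) (hr : r ≤ PySem.Str.len s) :
    PySem.Str.len (PySem.Str.slice s none (some r)) = r := by
  simp only [PySem.Str.slice, PySem.Chars.slice_eq_listSlice, PySem.Str.len_eq, String.toList_ofList]
  rw [PySem.List.slice_to _ h0]
  rw [PySem.Str.len_eq] at hr
  rw [List.length_take]
  omega

-- A's fused loop = acc ++ greedy walk over B's pairs
theorem pv_a_eq_walk (qw : PySem.Set String) (docs acc : List (List (String × String))) (total : Int) :
    pvALoop qw docs acc total = acc ++ pvW (pvBPairs qw docs) (800 - total) := by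
  rw [pv_pairs_eq]
  induction docs generalizing acc total with
  | nil => simp [pvALoop, pvPF, pvW]
  | cons doc rest ih =>
    by_cases h0 : (PySem.Dict.mk doc).getD "text" "" = ""
    · rw [show pvALoop qw (doc :: rest) acc total = pvALoop qw rest acc total by
        simp only [pvALoop]; rw [if_pos (by simpa using h0)]]
      rw [ih]
      simp only [pvPF, List.filter_cons]
      rw [if_neg (by simp [h0])]
    · have hct : pvACompress qw ((PySem.Dict.mk doc).getD "text" "") =
        pvBCompress qw ((PySem.Dict.mk doc).getD "text" "") := pv_compress_eq qw _
      have hPF : pvPF qw (doc :: rest) =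
          (doc, pvBCompress qw ((PySem.Dict.mk doc).getD "text" "")) :: pvPF qw rest := by
        simp only [pvPF, List.filter_cons]
        rw [if_pos (by simp [h0])]
        simp
      rw [hPF]
      set ct := pvBCompress qw ((PySem.Dict.mk doc).getD "text" "") with hctdef
      have hA : pvALoop qw (doc :: rest) acc total =
          (if total + PySem.Str.len ct > 800 then
            (if 800 - total > 50 then
              pvALoop qw rest (acc ++ [pvMerge doc (PySem.Str.slice ct none (some (800 - total)) ++ "...")])
                (total + PySem.Str.len (PySem.Str.slice ct none (some (800 - total)) ++ "..."))
            else acc)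
          else pvALoop qw rest (acc ++ [pvMerge doc ct]) (total + PySem.Str.len ct)) := by
        simp only [pvALoop]
        rw [if_neg (by simpa using h0), hct]
      rw [hA]
      by_cases hbig : total + PySem.Str.len ct > 800
      · rw [if_pos hbig]
        by_cases hrem : 800 - total > 50
        · rw [if_pos hrem]
          have hlen : PySem.Str.len (PySem.Str.slice ct none (some (800 - total)) ++ "...") =
              (800 - total) + 3 := by
            rw [PySem.Str.len_append]
            rw [pv_len_slice ct (800 - total) (by omega) (by omega)]
            have h3 : PySem.Str.len "..." = 3 := by decide
            rw [h3]
          rw [hlen, show total + (800 - total + 3) = 803 by ring, pv_aloop_803]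
          rw [show pvW ((doc, ct) :: pvPF qw rest) (800 - total) =
            [pvMerge doc (PySem.Str.slice ct none (some (800 - total)) ++ "...")] by
              simp only [pvW]; rw [if_pos (by omega), if_pos hrem]]
        · rw [if_neg hrem]
          rw [show pvW ((doc, ct) :: pvPF qw rest) (800 - total) = [] by
            simp only [pvW]; rw [if_pos (by omega), if_neg hrem]]
          rw [List.append_nil]
      · rw [if_neg hbig]
        rw [ih]
        rw [show pvW ((doc, ct) :: pvPF qw rest) (800 - total) =
            pvMerge doc ct :: pvW (pvPF qw rest) ((800 - total) - PySem.Str.len ct) by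
          simp only [pvW]; rw [if_neg (by omega)]]
        rw [show 800 - (total + PySem.Str.len ct) = (800 - total) - PySem.Str.len ct by ring]
        rw [List.append_assoc, List.singleton_append]

-- shifting the prefix-sum accumulator
theorem pv_sums_shift (pairs : List ((List (String × String)) × String)) (t : Int) :
    pvBSums pairs t = (pvBSums pairs 0).map (t + ·) := by
  induction pairs generalizing t with
  | nil => simp [pvBSums]
  | cons p rest ih =>
    obtain ⟨d, ct⟩ := p
    simp only [pvBSums, List.map_cons, zero_add]
    rw [ih (t + PySem.Str.len ct), ih (PySem.Str.len ct), List.map_map]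
    congr 1
    simp [Function.comp_def, add_assoc]

-- prefix sums from t are ≥ t
theorem pv_sums_lb (pairs : List ((List (String × String)) × String)) (t : Int) :
    ∀ x ∈ pvBSums pairs t, t ≤ x := by
  induction pairs generalizing t with
  | nil => simp [pvBSums]
  | cons p rest ih =>
    obtain ⟨d, ct⟩ := p
    intro x hx
    simp only [pvBSums, List.mem_cons] at hx
    have hL := pv_len_nonneg ct
    rcases hx with h | h
    · omega
    · have := ih (t + PySem.Str.len ct) x h
      omega

theorem pv_sums_len (pairs : List ((List (String × String)) × String)) (t : Int) :
    (pvBSums pairs t).length = pairs.length := by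
  induction pairs generalizing t with
  | nil => rfl
  | cons p rest ih => obtain ⟨d, ct⟩ := p; simp [pvBSums, ih]

-- B's staged pipeline computes the greedy walk
theorem pv_filter_shift (S : List Int) (L b : Int) :
    (S.map (L + ·)).filter (fun p => decide (p ≤ b)) = (S.filter (fun p => decide (p ≤ b - L))).map (L + ·) := by
  rw [List.filter_map]
  congr 1
  apply List.filter_congr
  intro x _
  simp only [Function.comp_def]
  exact decide_eq_decide.mpr (by omega)

theorem pv_filter_none (S : List Int) (L b : Int) (h : b < L) (hS : ∀ x ∈ S, 0 ≤ x) :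
    (S.map (L + ·)).filter (fun p => decide (p ≤ b)) = [] := by
  rw [List.filter_eq_nil_iff]
  intro a ha
  simp only [List.mem_map] at ha
  obtain ⟨x, hx, rfl⟩ := ha
  have := hS x hx
  simp only [decide_eq_true_eq]
  omega

theorem pv_staged_eq_walk : ∀ (pairs : List ((List (String × String)) × String)) (b : Int),
    pvStaged pairs b = pvW pairs b
  | [], b => by
    simp only [pvStaged, pvBSums, pvW]
    rw [PySem.List.slice_to _ (by norm_num)]
    simp [PySem.List.len_eq]
  | (doc, ct) :: rest, b => by
    have hL := pv_len_nonneg ct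
    have hSlb := pv_sums_lb rest 0
    have hSlen := pv_sums_len rest 0
    have hsums : pvBSums ((doc, ct) :: rest) 0 =
        PySem.Str.len ct :: (pvBSums rest 0).map (PySem.Str.len ct + ·) := by
      simp only [pvBSums, zero_add]
      rw [pv_sums_shift]
    by_cases hc : PySem.Str.len ct ≤ b
    · -- head fits: both sides cons `pvMerge doc ct`
      have hfilter : (pvBSums ((doc, ct) :: rest) 0).filter (fun p => decide (p ≤ b)) =
          PySem.Str.len ct :: ((pvBSums rest 0).filter (fun p => decide (p ≤ b - PySem.Str.len ct))).map (PySem.Str.len ct + ·) := by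
        rw [hsums, List.filter_cons, if_pos (by simpa using hc), pv_filter_shift]
      have hW : pvW ((doc, ct) :: rest) b = pvMerge doc ct :: pvW rest (b - PySem.Str.len ct) := by
        simp only [pvW]; rw [if_neg (by omega)]
      rw [hW, ← pv_staged_eq_walk rest (b - PySem.Str.len ct)]
      simp only [pvStaged, hfilter, PySem.List.len_eq, List.length_cons, List.length_map]
      rw [hsums]
      set S := pvBSums rest 0 with hS
      set L := PySem.Str.len ct with hLd
      have hKle : (S.filter (fun p => decide (p ≤ b - L))).length ≤ rest.length := by
        rw [← hSlen]; exact List.length_filter_le _ _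
      generalize hKdef : (S.filter (fun p => decide (p ≤ b - L))).length = K at hKle ⊢
      by_cases hk : K < rest.length
      · rw [if_pos (show ((K + 1 : Nat) : Int) < ((rest.length + 1 : Nat) : Int) by
              push_cast; omega),
            if_pos (show ((K : Nat) : Int) < ((rest.length : Nat) : Int) by omega)]
        rw [if_neg (show ¬((((K + 1 : Nat) : Int)) == 0) = true by
              simp only [beq_iff_eq]; push_cast; omega)]
        rw [show (((K + 1 : Nat) : Int)) - 1 = (K : Int) by push_cast; ring,
            PySem.List.pyGetD_natCast]
        have hrem : b - (L :: S.map (L + ·)).getD K 0 =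
            b - L - (if (((K : Nat) : Int) == 0) = true then 0
                     else PySem.List.pyGetD S ((K : Int) - 1) 0) := by
          cases K with
          | zero => simp
          | succ j =>
            rw [if_neg (by simp only [beq_iff_eq]; push_cast; omega)]
            have hj : j < S.length := by omega
            rw [List.getD_cons_succ]
            have hmap : (S.map (L + ·)).getD j 0 = L + S.getD j 0 := by
              rw [List.getD_eq_getElem?_getD, List.getElem?_map, List.getD_eq_getElem?_getD,
                  List.getElem?_eq_getElem hj]
              rfl
            rw [hmap, show (((j + 1 : Nat) : Int)) - 1 = (j : Int) by push_cast; ring,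
                PySem.List.pyGetD_natCast]
            ring
        rw [hrem]
        have hslice : PySem.List.slice ((doc, ct) :: rest) none (some ((K + 1 : Nat) : Int)) =
            (doc, ct) :: List.take K rest := by
          rw [PySem.List.slice_to_natCast, List.take_succ_cons]
        have hget : PySem.List.pyGetD ((doc, ct) :: rest) ((K + 1 : Nat) : Int) ([], "") =
            PySem.List.pyGetD rest ((K : Nat) : Int) ([], "") := by
          rw [PySem.List.pyGetD_natCast, PySem.List.pyGetD_natCast, List.getD_cons_succ]
        by_cases hr : b - L - (if (((K : Nat) : Int) == 0) = true then 0
            else PySem.List.pyGetD S ((K : Int) - 1) 0) > 50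
        · rw [if_pos hr, if_pos hr, hslice, hget, PySem.List.slice_to_natCast,
              List.map_cons, List.cons_append]
        · rw [if_neg hr, if_neg hr, hslice, PySem.List.slice_to_natCast, List.map_cons]
      · rw [if_neg (show ¬(((K + 1 : Nat) : Int) < ((rest.length + 1 : Nat) : Int)) by
              push_cast; omega),
            if_neg (show ¬(((K : Nat) : Int) < ((rest.length : Nat) : Int)) by
              omega)]
        rw [PySem.List.slice_to_natCast, PySem.List.slice_to_natCast,
            List.take_succ_cons, List.map_cons]
    · -- head does not fit: cutoff is 0
      have hfilter : (pvBSums ((doc, ct) :: rest) 0).filter (fun p => decide (p ≤ b)) = [] := by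
        rw [hsums, List.filter_cons, if_neg (by simpa using hc)]
        exact pv_filter_none _ _ _ (by omega) hSlb
      have hW : pvW ((doc, ct) :: rest) b =
          (if b > 50 then [pvMerge doc (PySem.Str.slice ct none (some b) ++ "...")] else []) := by
        simp only [pvW]; rw [if_pos (by omega)]
      rw [hW]
      simp only [pvStaged, hfilter, PySem.List.len_eq, List.length_nil, List.length_cons]
      rw [if_pos (show ((0 : Nat) : Int) < ((rest.length + 1 : Nat) : Int) by push_cast; omega)]
      rw [if_pos (show (((0 : Nat) : Int) == 0) = true by simp)]
      rw [PySem.List.slice_to_natCast, List.take_zero, List.map_nil, sub_zero]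
      rw [show ((0 : Nat) : Int) = (0 : Int) by norm_num, PySem.List.pyGetD_zero_cons]
      by_cases hr : b > 50
      · rw [if_pos hr, if_pos hr, List.nil_append]
      · rw [if_neg hr, if_neg hr]

-- ===== VERDICT (by name: the statement is the Claim_ definition above) =====
theorem contextual_compress_py_spec : Claim_equal_contextual_compress_py := by
  intro docs query _
  unfold Spec_contextual_compress_py
  have hA : contextual_compress_py docs query =
      pvALoop (PySem.Set.ofList (PySem.Str.split₀ (PySem.Str.lower query))) docs [] 0 := rfl
  have hB : contextual_compress_py_alt docs query =
      pvStaged (pvBPairs (PySem.Set.ofList (PySem.Str.split₀ (PySem.Str.lower query))) docs) 800 := rfl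
  rw [hA, hB, pv_staged_eq_walk, pv_a_eq_walk]
  norm_num
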